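-- pv_equiv track=rewrite | github.com/hoangnghia24/DoAnAI | simulated_annealing_sokoban.py | _precompute_deadlocks
-- ===== SOURCE A (Python) =====
-- from typing import List, Tuple, Optional, Set, FrozenSet, Iterable
--
-- def _precompute_deadlocks(walls: Set[Tuple[int, int]], goals: Set[Tuple[int, int]], level_data: List[List[str]]) -> Set[Tuple[int, int]]:
--     """
--     TÍNH TOÁN TRƯỚC các ô deadlock tĩnh. Một ô là deadlock nếu nó không phải là đích và:
--     1. Bị kẹt ở góc.
--     2. Bị kẹt dọc theo một bức tường mà không có lối thoát hoặc đích nào trên đường đi.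
--     """
--     deadlocks = set()
--     height = len(level_data)
--     width = len(level_data[0]) if height > 0 else 0
--
--     for r in range(height):
--         for c in range(width):
--             pos = (c, r)
--             if pos in walls or pos in goals:
--                 continue
--
--             # 1. Kiểm tra kẹt ở góc (giữa 2 bức tường)
--             is_corner = ((c - 1, r) in walls and (c, r - 1) in walls) or \
--                         ((c + 1, r) in walls and (c, r - 1) in walls) or \
--                         ((c - 1, r) in walls and (c, r + 1) in walls) or \
--                         ((c + 1, r) in walls and (c, r + 1) in walls)
--             if is_corner:
--                 deadlocks.add(pos)
--                 continue
--
--             # 2. Kiểm tra kẹt dọc tường (khó hơn)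
--             # Kẹt tường ngang (trên hoặc dưới)
--             for dy in [-1, 1]:
--                 if (c, r + dy) in walls:
--                     is_stuck = True
--                     # Quét sang trái để tìm lối ra hoặc đích
--                     for x_scan in range(c, -1, -1):
--                         if (x_scan, r + dy) not in walls: is_stuck = False; break
--                         if (x_scan, r) in goals: is_stuck = False; break
--                     if not is_stuck: continue
--
--                     is_stuck = True
--                     # Quét sang phải để tìm lối ra hoặc đích
--                     for x_scan in range(c, width):
--                         if (x_scan, r + dy) not in walls: is_stuck = False; break
--                         if (x_scan, r) in goals: is_stuck = False; break
--                     if is_stuck: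
--                         deadlocks.add(pos)
--
--             # Kẹt tường dọc (trái hoặc phải)
--             for dx in [-1, 1]:
--                 if (c + dx, r) in walls:
--                     is_stuck = True
--                     # Quét lên trên
--                     for y_scan in range(r, -1, -1):
--                         if (c + dx, y_scan) not in walls: is_stuck = False; break
--                         if (c, y_scan) in goals: is_stuck = False; break
--                     if not is_stuck: continue
--
--                     is_stuck = True
--                     # Quét xuống dưới
--                     for y_scan in range(r, height):
--                         if (c + dx, y_scan) not in walls: is_stuck = False; break
--                         if (c, y_scan) in goals: is_stuck = False; break
--                     if is_stuck:
--                         deadlocks.add(pos)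
--
--     return deadlocks
-- ===== SOURCE B (Python) =====
-- def _precompute_deadlocks(walls, goals, level_data):
--     height = len(level_data)
--     width = len(level_data[0]) if height > 0 else 0
--
--     # Precompute, per row r and vertical offset dy, whether the entire adjacent
--     # row r+dy is wall and row r carries no goal: any free cell of such a row is
--     # wall-stuck (A's left+right scans from c together cover the whole row).
--     row_stuck = [
--         [all((x, r + dy) in walls and (x, r) not in goals for x in range(width))
--          for dy in (-1, 1)]
--         for r in range(height)]
--     col_stuck = [
--         [all((c + dx, y) in walls and (c, y) not in goals for y in range(height))
--          for dx in (-1, 1)]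
--         for c in range(width)]
--
--     deadlocks = set()
--     for r in range(height):
--         for c in range(width):
--             pos = (c, r)
--             if pos in walls or pos in goals:
--                 continue
--             corner = (((c - 1, r) in walls or (c + 1, r) in walls) and
--                       ((c, r - 1) in walls or (c, r + 1) in walls))
--             if corner or row_stuck[r][0] or row_stuck[r][1] \
--                     or col_stuck[c][0] or col_stuck[c][1]:
--                 deadlocks.add(pos)
--     return deadlocks
-- ===== Notes on version B (the rewrite author's own statement) =====
-- stated objective: faster
-- what changed: A rescans a whole row/column segment from every cell to decide wall-stuckness; B precomputes one boolean per row/column and direction (whole adjacent line is wall and no goal on the line, which is what A's left+right scans jointly test), then does a single pass over the cells.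
import Mathlib
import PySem

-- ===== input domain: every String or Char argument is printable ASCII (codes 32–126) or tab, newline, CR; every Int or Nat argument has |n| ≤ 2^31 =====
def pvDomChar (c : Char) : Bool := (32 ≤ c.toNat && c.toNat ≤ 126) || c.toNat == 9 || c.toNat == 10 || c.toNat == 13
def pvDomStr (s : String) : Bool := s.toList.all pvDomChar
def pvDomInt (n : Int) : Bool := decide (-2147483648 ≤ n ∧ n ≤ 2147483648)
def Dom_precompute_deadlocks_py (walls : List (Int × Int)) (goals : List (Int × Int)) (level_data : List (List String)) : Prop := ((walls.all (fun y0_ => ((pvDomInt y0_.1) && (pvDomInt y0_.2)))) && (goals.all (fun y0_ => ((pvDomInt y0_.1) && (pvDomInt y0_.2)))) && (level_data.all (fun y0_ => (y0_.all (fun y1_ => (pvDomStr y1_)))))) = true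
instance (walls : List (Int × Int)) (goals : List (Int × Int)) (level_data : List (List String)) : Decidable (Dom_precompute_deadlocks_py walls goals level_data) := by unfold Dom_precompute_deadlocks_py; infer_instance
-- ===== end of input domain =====

-- B replaces A's per-cell wall scans by row/column "stuck" flags precomputed once per row and
-- column (objective: faster — O(W*H) instead of O(W*H*(W+H))). Return value only (a set).

-- ===== PORT A =====
-- A's inner scan loop ('for x_scan in range(...): if wall missing: break; if goal: break'):
-- is_stuck stays True iff the loop runs to the end.
def pvScanStuck (walls goals : List (Int × Int)) (wallAt goalAt : Int → Int × Int) : List Int → Bool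
  | [] => true
  | i :: rest =>
    if ¬ ((wallAt i) ∈ walls) then false
    else if (goalAt i) ∈ goals then false
    else pvScanStuck walls goals wallAt goalAt rest

def precompute_deadlocks_py (walls : List (Int × Int)) (goals : List (Int × Int)) (level_data : List (List String)) : List (Int × Int) :=
  let height : Int := PySem.List.len level_data
  -- level_data[0]: index 0 is in range because height > 0
  let width : Int := if height > 0 then PySem.List.len (level_data.headD []) else 0
  (PySem.List.pyRange 0 height 1).foldl (fun dl r =>
    (PySem.List.pyRange 0 width 1).foldl (fun dl c =>
      if (c, r) ∈ walls ∨ (c, r) ∈ goals then dl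
      else if ((c - 1, r) ∈ walls ∧ (c, r - 1) ∈ walls) ∨ ((c + 1, r) ∈ walls ∧ (c, r - 1) ∈ walls) ∨
              ((c - 1, r) ∈ walls ∧ (c, r + 1) ∈ walls) ∨ ((c + 1, r) ∈ walls ∧ (c, r + 1) ∈ walls) then
        PySem.Set.add dl (c, r)
      else
        let dl2 := [(-1 : Int), 1].foldl (fun dl dy =>
          if (c, r + dy) ∈ walls then
            if ¬ (pvScanStuck walls goals (fun x => (x, r + dy)) (fun x => (x, r)) (PySem.List.pyRange c (-1) (-1)) = true) then dl
            else if pvScanStuck walls goals (fun x => (x, r + dy)) (fun x => (x, r)) (PySem.List.pyRange c width 1) = true then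
              PySem.Set.add dl (c, r)
            else dl
          else dl) dl
        [(-1 : Int), 1].foldl (fun dl dx =>
          if (c + dx, r) ∈ walls then
            if ¬ (pvScanStuck walls goals (fun y => (c + dx, y)) (fun y => (c, y)) (PySem.List.pyRange r (-1) (-1)) = true) then dl
            else if pvScanStuck walls goals (fun y => (c + dx, y)) (fun y => (c, y)) (PySem.List.pyRange r height 1) = true then
              PySem.Set.add dl (c, r)
            else dl
          else dl) dl2) dl) PySem.Set.empty

-- ===== PORT B =====
-- row r is "stuck" towards dy iff the whole row r+dy is wall and row r carries no goal
def pvRowStuck (walls goals : List (Int × Int)) (width r dy : Int) : Bool :=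
  (PySem.List.pyRange 0 width 1).all (fun x => decide ((x, r + dy) ∈ walls) && ! decide ((x, r) ∈ goals))

def pvColStuck (walls goals : List (Int × Int)) (height c dx : Int) : Bool :=
  (PySem.List.pyRange 0 height 1).all (fun y => decide ((c + dx, y) ∈ walls) && ! decide ((c, y) ∈ goals))

def precompute_deadlocks_py_alt (walls : List (Int × Int)) (goals : List (Int × Int)) (level_data : List (List String)) : List (Int × Int) :=
  let height : Int := PySem.List.len level_data
  -- level_data[0]: index 0 is in range because height > 0
  let width : Int := if height > 0 then PySem.List.len (level_data.headD []) else 0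
  let row_stuck := (PySem.List.pyRange 0 height 1).map (fun r => [(-1 : Int), 1].map (fun dy => pvRowStuck walls goals width r dy))
  let col_stuck := (PySem.List.pyRange 0 width 1).map (fun c => [(-1 : Int), 1].map (fun dx => pvColStuck walls goals height c dx))
  (PySem.List.pyRange 0 height 1).foldl (fun dl r =>
    (PySem.List.pyRange 0 width 1).foldl (fun dl c =>
      if (c, r) ∈ walls ∨ (c, r) ∈ goals then dl
      else
        -- row_stuck[r] / col_stuck[c]: indices always in range inside the loops
        let rs := PySem.List.pyGetD row_stuck r []
        let cs := PySem.List.pyGetD col_stuck c []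
        if ((decide ((c - 1, r) ∈ walls) || decide ((c + 1, r) ∈ walls)) &&
            (decide ((c, r - 1) ∈ walls) || decide ((c, r + 1) ∈ walls))) ||
           rs.getD 0 false || rs.getD 1 false || cs.getD 0 false || cs.getD 1 false then
          PySem.Set.add dl (c, r)
        else dl) dl) PySem.Set.empty

-- ===== PRECONDITION & SPEC =====
def Spec_precompute_deadlocks_py (walls : List (Int × Int)) (goals : List (Int × Int)) (level_data : List (List String)) (out : List (Int × Int)) : Prop := out = precompute_deadlocks_py_alt walls goals level_data
instance (walls : List (Int × Int)) (goals : List (Int × Int)) (level_data : List (List String)) (out : List (Int × Int)) : Decidable (Spec_precompute_deadlocks_py walls goals level_data out) := by unfold Spec_precompute_deadlocks_py; infer_instance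

-- ===== CLAIM (what is proved, stated in full; the proofs are below) =====
def Claim_equal_precompute_deadlocks_py : Prop := ∀ (walls : List (Int × Int)) (goals : List (Int × Int)) (level_data : List (List String)), Dom_precompute_deadlocks_py walls goals level_data → Spec_precompute_deadlocks_py walls goals level_data (precompute_deadlocks_py walls goals level_data)

-- ===== LEMMAS AND PROOFS =====

-- A's break-on-failure scan is an 'all' over the scanned indices
lemma pvScanStuck_eq_all (walls goals : List (Int × Int)) (wallAt goalAt : Int → Int × Int) (l : List Int) :
    pvScanStuck walls goals wallAt goalAt l
      = l.all (fun i => decide ((wallAt i) ∈ walls) && ! decide ((goalAt i) ∈ goals)) := by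
  induction l with
  | nil => rfl
  | cons i rest ih =>
    simp only [pvScanStuck, List.all_cons]
    by_cases hw : (wallAt i) ∈ walls <;> by_cases hg : (goalAt i) ∈ goals <;> simp [hw, hg, ih]

-- left scan plus right scan from c cover exactly the whole row/column
lemma pv_split_all (p : Int → Bool) (c n : Int) (h0 : 0 ≤ c) (hn : c < n) :
    ((PySem.List.pyRange c (-1) (-1)).all p && (PySem.List.pyRange c n 1).all p)
      = (PySem.List.pyRange 0 n 1).all p := by
  rw [Bool.eq_iff_iff]
  simp only [Bool.and_eq_true, List.all_eq_true, PySem.List.mem_pyRange_one,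
    PySem.List.mem_pyRange_neg_one]
  constructor
  · rintro ⟨hL, hR⟩ x ⟨hx0, hxn⟩
    rcases le_or_gt x c with h | h
    · exact hL x ⟨by omega, h⟩
    · exact hR x ⟨by omega, hxn⟩
  · rintro hA
    exact ⟨fun x hx => hA x ⟨by omega, by omega⟩, fun x hx => hA x ⟨by omega, hx.2⟩⟩

-- A's per-direction body (entry test + two scans) equals B's precomputed row flag
lemma pv_row_step (walls goals : List (Int × Int)) (width r c dy : Int)
    (h0 : 0 ≤ c) (hc : c < width) (dl : List (Int × Int)) :
    (if (c, r + dy) ∈ walls then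
       if ¬ (pvScanStuck walls goals (fun x => (x, r + dy)) (fun x => (x, r)) (PySem.List.pyRange c (-1) (-1)) = true) then dl
       else if pvScanStuck walls goals (fun x => (x, r + dy)) (fun x => (x, r)) (PySem.List.pyRange c width 1) = true then
         PySem.Set.add dl (c, r)
       else dl
     else dl)
    = (if pvRowStuck walls goals width r dy then PySem.Set.add dl (c, r) else dl) := by
  have hsplit := pv_split_all (fun x => decide ((x, r + dy) ∈ walls) && ! decide ((x, r) ∈ goals)) c width h0 hc
  rw [pvScanStuck_eq_all, pvScanStuck_eq_all]
  unfold pvRowStuck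
  rw [← hsplit]
  by_cases hw : (c, r + dy) ∈ walls
  · simp only [hw, if_true]
    by_cases hL : (PySem.List.pyRange c (-1) (-1)).all (fun x => decide ((x, r + dy) ∈ walls) && ! decide ((x, r) ∈ goals)) = true <;>
      by_cases hR : (PySem.List.pyRange c width 1).all (fun x => decide ((x, r + dy) ∈ walls) && ! decide ((x, r) ∈ goals)) = true <;>
      simp [hL, hR]
  · -- entry wall missing: the right scan starts at c and fails immediately, so B's flag is false too
    have hcmem : c ∈ PySem.List.pyRange c width 1 := by
      rw [PySem.List.mem_pyRange_one]; exact ⟨le_refl c, hc⟩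
    have : (PySem.List.pyRange c width 1).all (fun x => decide ((x, r + dy) ∈ walls) && ! decide ((x, r) ∈ goals)) = false := by
      rw [List.all_eq_false]
      exact ⟨c, hcmem, by simp [hw]⟩
    simp [hw, this]

lemma pv_col_step (walls goals : List (Int × Int)) (height r c dx : Int)
    (h0 : 0 ≤ r) (hr : r < height) (dl : List (Int × Int)) :
    (if (c + dx, r) ∈ walls then
       if ¬ (pvScanStuck walls goals (fun y => (c + dx, y)) (fun y => (c, y)) (PySem.List.pyRange r (-1) (-1)) = true) then dl
       else if pvScanStuck walls goals (fun y => (c + dx, y)) (fun y => (c, y)) (PySem.List.pyRange r height 1) = true then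
         PySem.Set.add dl (c, r)
       else dl
     else dl)
    = (if pvColStuck walls goals height c dx then PySem.Set.add dl (c, r) else dl) := by
  have hsplit := pv_split_all (fun y => decide ((c + dx, y) ∈ walls) && ! decide ((c, y) ∈ goals)) r height h0 hr
  rw [pvScanStuck_eq_all, pvScanStuck_eq_all]
  unfold pvColStuck
  rw [← hsplit]
  by_cases hw : (c + dx, r) ∈ walls
  · simp only [hw, if_true]
    by_cases hL : (PySem.List.pyRange r (-1) (-1)).all (fun y => decide ((c + dx, y) ∈ walls) && ! decide ((c, y) ∈ goals)) = true <;>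
      by_cases hR : (PySem.List.pyRange r height 1).all (fun y => decide ((c + dx, y) ∈ walls) && ! decide ((c, y) ∈ goals)) = true <;>
      simp [hL, hR]
  · have hrmem : r ∈ PySem.List.pyRange r height 1 := by
      rw [PySem.List.mem_pyRange_one]; exact ⟨le_refl r, hr⟩
    have : (PySem.List.pyRange r height 1).all (fun y => decide ((c + dx, y) ∈ walls) && ! decide ((c, y) ∈ goals)) = false := by
      rw [List.all_eq_false]
      exact ⟨r, hrmem, by simp [hw]⟩
    simp [hw, this]

-- four conditional adds of the same element collapse to one conditional add of the disjunction
lemma pv_four_adds (dl : List (Int × Int)) (p : Int × Int) (b1 b2 b3 b4 : Bool) :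
    (if b4 then PySem.Set.add (if b3 then PySem.Set.add (if b2 then PySem.Set.add (if b1 then PySem.Set.add dl p else dl) p else (if b1 then PySem.Set.add dl p else dl)) p else (if b2 then PySem.Set.add (if b1 then PySem.Set.add dl p else dl) p else (if b1 then PySem.Set.add dl p else dl))) p else (if b3 then PySem.Set.add (if b2 then PySem.Set.add (if b1 then PySem.Set.add dl p else dl) p else (if b1 then PySem.Set.add dl p else dl)) p else (if b2 then PySem.Set.add (if b1 then PySem.Set.add dl p else dl) p else (if b1 then PySem.Set.add dl p else dl))))
    = (if b1 || b2 || b3 || b4 then PySem.Set.add dl p else dl) := by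
  cases b1 <;> cases b2 <;> cases b3 <;> cases b4 <;> simp

-- ===== VERDICT (by name: the statement is the Claim_ definition above) =====

theorem precompute_deadlocks_py_spec : Claim_equal_precompute_deadlocks_py := by
  intro walls goals level_data _hdom
  unfold Spec_precompute_deadlocks_py precompute_deadlocks_py precompute_deadlocks_py_alt
  apply PySem.List.foldl_congr_mem
  intro dl r hrmem
  rw [PySem.List.mem_pyRange_one] at hrmem
  apply PySem.List.foldl_congr_mem
  intro dl c hcmem
  rw [PySem.List.mem_pyRange_one] at hcmem
  by_cases hskip : (c, r) ∈ walls ∨ (c, r) ∈ goals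
  · simp only [hskip, if_true]
  · simp only [hskip, if_false]
    -- B's table lookups reduce to the flags of row r / column c
    rw [PySem.List.pyGetD_map_pyRange_of_nonneg _ _ _ _ hrmem.1 hrmem.2,
        PySem.List.pyGetD_map_pyRange_of_nonneg _ _ _ _ hcmem.1 hcmem.2]
    simp only [List.map_cons, List.map_nil, List.getD_cons_zero, List.getD_cons_succ]
    by_cases hcorner : ((c - 1, r) ∈ walls ∧ (c, r - 1) ∈ walls) ∨ ((c + 1, r) ∈ walls ∧ (c, r - 1) ∈ walls) ∨
        ((c - 1, r) ∈ walls ∧ (c, r + 1) ∈ walls) ∨ ((c + 1, r) ∈ walls ∧ (c, r + 1) ∈ walls)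
    · have hb : ((decide ((c - 1, r) ∈ walls) || decide ((c + 1, r) ∈ walls)) &&
          (decide ((c, r - 1) ∈ walls) || decide ((c, r + 1) ∈ walls))) = true := by
        simp only [Bool.and_eq_true, Bool.or_eq_true, decide_eq_true_eq]
        tauto
      simp [hcorner, hb]
    · have hb : ((decide ((c - 1, r) ∈ walls) || decide ((c + 1, r) ∈ walls)) &&
          (decide ((c, r - 1) ∈ walls) || decide ((c, r + 1) ∈ walls))) = false := by
        simp only [Bool.and_eq_false_iff, Bool.or_eq_false_iff, decide_eq_false_iff_not]
        tauto
      simp only [hcorner, if_false, hb, Bool.false_or]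
      simp only [List.foldl_cons, List.foldl_nil]
      rw [pv_row_step walls goals _ r c (-1) hcmem.1 hcmem.2,
          pv_row_step walls goals _ r c 1 hcmem.1 hcmem.2,
          pv_col_step walls goals _ r c (-1) hrmem.1 hrmem.2,
          pv_col_step walls goals _ r c 1 hrmem.1 hrmem.2]
      exact pv_four_adds dl (c, r) _ _ _ _
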